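-- pv_equiv track=rewrite | github.com/UdayKiranPadhy/Leetcode | 2145-count-the-hidden-sequences/2145-count-the-hidden-sequences.py | numberOfArrays
-- ===== SOURCE A (Python) =====
-- from typing import List
--
-- def numberOfArrays(differences: List[int], lower: int, upper: int) -> int:
--
--     low, high, total = 0,0, 0
--     for diff in differences:
--         total += diff
--         low = min(total,low)
--         high = max(total,high)
--
--     height = abs(high) + abs(low)
--
--     ans = 0
--     while lower + height <= upper:
--         ans += 1
--         lower += 1
--
--     return ans
-- ===== SOURCE B (Python) =====
-- def numberOfArrays(differences, lower, upper):
--     prefix = [0]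
--     t = 0
--     for d in differences:
--         t += d
--         prefix.append(t)
--     height = max(prefix) - min(prefix)
--     return max(0, upper - lower - height + 1)
-- ===== Notes on version B (the rewrite author's own statement) =====
-- stated objective: faster
-- what changed: B builds the prefix-sum list and takes builtin max/min of it, then replaces A's while-loop counter with the closed form max(0, upper - lower - height + 1).
import Mathlib
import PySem

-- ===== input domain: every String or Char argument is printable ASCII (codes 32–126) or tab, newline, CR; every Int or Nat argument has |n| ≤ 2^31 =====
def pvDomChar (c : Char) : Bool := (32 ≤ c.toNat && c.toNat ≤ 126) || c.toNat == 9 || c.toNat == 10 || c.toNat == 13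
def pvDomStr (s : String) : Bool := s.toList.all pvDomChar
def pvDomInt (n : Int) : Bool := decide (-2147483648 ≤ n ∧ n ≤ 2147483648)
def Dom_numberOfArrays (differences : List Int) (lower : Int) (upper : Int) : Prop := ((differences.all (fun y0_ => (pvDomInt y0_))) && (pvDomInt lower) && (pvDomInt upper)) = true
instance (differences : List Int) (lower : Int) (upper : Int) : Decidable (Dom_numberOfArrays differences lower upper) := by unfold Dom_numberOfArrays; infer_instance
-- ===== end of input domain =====

-- B replaces A's per-unit counting while-loop with the closed form max(0, upper - lower - height + 1) over the prefix-sum extrema (asymptotically faster when upper - lower is large).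

-- ===== PORT A =====
-- A's trailing while-loop: while lower + height <= upper: ans += 1; lower += 1
def pvWhileCount (lower upper height ans : Int) : Int :=
  if lower + height ≤ upper then pvWhileCount (lower + 1) upper height (ans + 1) else ans
termination_by (upper + 1 - lower - height).toNat
decreasing_by omega

def numberOfArrays (differences : List Int) (lower : Int) (upper : Int) : Int :=
  let s := differences.foldl
    (fun (s : Int × Int × Int) diff =>
      let total := s.2.2 + diff
      (min total s.1, max total s.2.1, total))
    (0, 0, 0)
  let height := |s.2.1| + |s.1|
  pvWhileCount lower upper height 0

-- ===== PORT B =====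
def numberOfArrays_alt (differences : List Int) (lower : Int) (upper : Int) : Int :=
  let s := differences.foldl
    (fun (s : List Int × Int) d => (s.1 ++ [s.2 + d], s.2 + d)) ([0], 0)
  -- builtin max/min of the nonempty prefix list (PySem.List.max?/min?, value form)
  let height := (PySem.List.max? s.1 (fun y => y)).getD 0 - (PySem.List.min? s.1 (fun y => y)).getD 0
  max 0 (upper - lower - height + 1)

-- ===== PRECONDITION & SPEC =====
def Spec_numberOfArrays (differences : List Int) (lower : Int) (upper : Int) (out : Int) : Prop := out = numberOfArrays_alt differences lower upper
instance (differences : List Int) (lower : Int) (upper : Int) (out : Int) : Decidable (Spec_numberOfArrays differences lower upper out) := by unfold Spec_numberOfArrays; infer_instance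

-- ===== CLAIM (what is proved, stated in full; the proofs are below) =====
def Claim_equal_numberOfArrays : Prop := ∀ (differences : List Int) (lower : Int) (upper : Int), Dom_numberOfArrays differences lower upper → Spec_numberOfArrays differences lower upper (numberOfArrays differences lower upper)

-- ===== LEMMAS AND PROOFS =====

-- the while-loop counts max 0 (upper - lower - height + 1) steps
theorem pvWhileCount_eq (lower upper height ans : Int) :
    pvWhileCount lower upper height ans = ans + max 0 (upper - lower - height + 1) := by
  fun_induction pvWhileCount lower upper height ans with
  | case1 lo an hle ih => rw [ih]; omega
  | case2 lo an hle => omega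

theorem max?_append_singleton (ps : List Int) (h a : Int)
    (hm : PySem.List.max? ps (fun y => y) = some h) :
    PySem.List.max? (ps ++ [a]) (fun y => y) = some (max h a) := by
  cases ps with
  | nil => simp [PySem.List.max?] at hm
  | cons x t =>
    rw [PySem.List.max?_id_cons] at hm
    rw [List.cons_append, PySem.List.max?_id_cons, List.foldl_append]
    simp at hm ⊢
    omega

theorem min?_append_singleton (ps : List Int) (l a : Int)
    (hm : PySem.List.min? ps (fun y => y) = some l) :
    PySem.List.min? (ps ++ [a]) (fun y => y) = some (min l a) := by
  cases ps with
  | nil => simp [PySem.List.min?] at hm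
  | cons x t =>
    rw [PySem.List.min?_id_cons] at hm
    rw [List.cons_append, PySem.List.min?_id_cons, List.foldl_append]
    simp at hm ⊢
    omega

-- the two folds stay in lockstep: A's (low, high, total) are min/max/last of B's prefix list
theorem fold_rel (diffs : List Int) (t l h : Int) (ps : List Int)
    (hmax : PySem.List.max? ps (fun y => y) = some h)
    (hmin : PySem.List.min? ps (fun y => y) = some l) :
    PySem.List.max? ((diffs.foldl (fun (s : List Int × Int) d => (s.1 ++ [s.2 + d], s.2 + d)) (ps, t)).1) (fun y => y)
      = some ((diffs.foldl (fun (s : Int × Int × Int) diff => (min (s.2.2 + diff) s.1, max (s.2.2 + diff) s.2.1, s.2.2 + diff)) (l, h, t)).2.1)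
    ∧ PySem.List.min? ((diffs.foldl (fun (s : List Int × Int) d => (s.1 ++ [s.2 + d], s.2 + d)) (ps, t)).1) (fun y => y)
      = some ((diffs.foldl (fun (s : Int × Int × Int) diff => (min (s.2.2 + diff) s.1, max (s.2.2 + diff) s.2.1, s.2.2 + diff)) (l, h, t)).1) := by
  induction diffs generalizing t l h ps with
  | nil => exact ⟨hmax, hmin⟩
  | cons d rest ih =>
    simp only [List.foldl_cons]
    exact ih (t + d) (min (t + d) l) (max (t + d) h) (ps ++ [t + d])
      (by rw [max?_append_singleton ps h (t + d) hmax, max_comm])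
      (by rw [min?_append_singleton ps l (t + d) hmin, min_comm])

-- A's final state keeps low ≤ 0 ≤ high
theorem fold_bounds (diffs : List Int) (t l h : Int) (hl : l ≤ 0) (hh : 0 ≤ h) :
    (diffs.foldl (fun (s : Int × Int × Int) diff => (min (s.2.2 + diff) s.1, max (s.2.2 + diff) s.2.1, s.2.2 + diff)) (l, h, t)).1 ≤ 0
    ∧ 0 ≤ (diffs.foldl (fun (s : Int × Int × Int) diff => (min (s.2.2 + diff) s.1, max (s.2.2 + diff) s.2.1, s.2.2 + diff)) (l, h, t)).2.1 := by
  induction diffs generalizing t l h with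
  | nil => exact ⟨hl, hh⟩
  | cons d rest ih =>
    simp only [List.foldl_cons]
    exact ih (t + d) (min (t + d) l) (max (t + d) h) (by omega) (by omega)

-- ===== VERDICT (by name: the statement is the Claim_ definition above) =====
theorem numberOfArrays_spec : Claim_equal_numberOfArrays := by
  intro diffs lower upper _
  unfold Spec_numberOfArrays numberOfArrays numberOfArrays_alt
  obtain ⟨hmax, hmin⟩ := fold_rel diffs 0 0 0 [0]
    (by simp [PySem.List.max?_id_cons]) (by simp [PySem.List.min?_id_cons])
  obtain ⟨hl0, hh0⟩ := fold_bounds diffs 0 0 0 le_rfl le_rfl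
  simp only [hmax, hmin, Option.getD_some, pvWhileCount_eq]
  rw [abs_of_nonpos hl0, abs_of_nonneg hh0]
  omega
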